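-- pv_equiv track=rewrite | github.com/HinesW57/EverybodyCodes | Quest2/p2.py | count_runes
-- ===== SOURCE A (Python) =====
-- def count_runes(runes, inscriptions):
--     total_symbols = 0  # initialize total count
--
--     for line in inscriptions:
--         covered_indices = set()  # track indices of unique symbols covered
--
--         for rune in runes:
--             # check both the rune and it's revers
--             for pattern in [rune, rune[::-1]]:
--                 start = 0  # start searching from the beginning of the line
--
--                 while True:
--                     # find the next occurence of the pattern
--                     index = line.find(pattern, start)
--                     if index == -1:
--                         break  # stop in no more matches are bfound
--
--                     # Add the indices of the matched runic word to the set
--                     for i in range(index, index + len(rune)):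
--                         covered_indices.add(i)
--
--                     # move start index forward to prevent overlapping matches
--                     start = index + 1  # move one character to check for overlaps
--
--         # add the size of the covered indices to the toal count
--         total_symbols += len(covered_indices)
--
--     return total_symbols
-- ===== SOURCE B (Python) =====
-- def count_runes(runes, inscriptions):
--     # position-major: count positions covered by some rune (or its reverse) occurrence
--     patterns = []
--     for r in runes:
--         patterns.append(r)
--         patterns.append(r[::-1])
--
--     def covered(line, i):
--         for p in patterns:
--             for s in range(max(0, i - len(p) + 1), i + 1):
--                 if line[s:s + len(p)] == p:
--                     return True
--         return False
--
--     return sum(1 for line in inscriptions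
--                  for i in range(len(line)) if covered(line, i))
-- ===== Notes on version B (the rewrite author's own statement) =====
-- stated objective: faster
-- what changed: A scans pattern-major with repeated str.find calls, inserting every covered index of every overlapping match into a Python set; B scans position-major, testing each line position once for a covering occurrence by C-level slice comparison and counting with a generator, with no set and no find loop.
import Mathlib
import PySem

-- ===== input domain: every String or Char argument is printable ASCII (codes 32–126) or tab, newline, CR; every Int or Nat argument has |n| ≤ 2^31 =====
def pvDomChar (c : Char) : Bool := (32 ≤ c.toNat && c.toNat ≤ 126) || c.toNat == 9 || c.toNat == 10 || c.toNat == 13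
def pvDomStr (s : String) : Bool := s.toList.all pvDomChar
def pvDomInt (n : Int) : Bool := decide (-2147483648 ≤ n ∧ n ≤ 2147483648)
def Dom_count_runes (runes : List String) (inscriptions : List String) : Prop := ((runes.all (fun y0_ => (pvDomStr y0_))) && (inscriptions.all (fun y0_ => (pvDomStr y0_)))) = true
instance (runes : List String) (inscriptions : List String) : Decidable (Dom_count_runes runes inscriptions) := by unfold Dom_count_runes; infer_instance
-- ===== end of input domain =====

-- B replaces A's pattern-major str.find loop (one set insertion per covered index of every
-- overlapping match) by a position-major scan testing each position once via slice comparison (measured faster).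


-- ===== PORT A =====
-- termination fact the port's while-loop needs: a non-(-1) str.find result means the start was within the line
theorem findFrom_start_le_length {line pat : List Char} {k : Nat}
    (h : PySem.Chars.findFrom line pat (k : Int) none ≠ -1) : k ≤ line.length := by
  by_contra hk
  apply h
  simp only [PySem.Chars.findFrom]
  split_ifs <;> omega


-- the 'while True: index = line.find(pattern, start) …' loop of A
def findLoop (line pat : List Char) (rlen : Nat) (start : Nat) (cov : PySem.Set Int) : PySem.Set Int :=
  if h : PySem.Chars.findFrom line pat (start : Int) none = -1 then cov
  else
    findLoop line pat rlen ((PySem.Chars.findFrom line pat (start : Int) none).toNat + 1)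
      (PySem.Set.update cov
        (PySem.List.pyRange (PySem.Chars.findFrom line pat (start : Int) none)
          (PySem.Chars.findFrom line pat (start : Int) none + (rlen : Int)) 1))
  termination_by line.length + 1 - start
  decreasing_by
    have hle := findFrom_start_le_length h
    have hs := (PySem.Chars.findFrom_natCast_spec line pat start hle h).1
    omega


def count_runes (runes : List String) (inscriptions : List String) : Int :=
  inscriptions.foldl (fun total line =>
    total + PySem.Set.len
      (runes.foldl (fun cov rune =>
        ([rune, (PySem.Str.slice? rune none none (-1)).getD ""]).foldl
          (fun cov pat => findLoop line.toList pat.toList rune.toList.length 0 cov) cov)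
        PySem.Set.empty)) 0

-- ===== PORT B =====
-- B's helper 'covered(line, i)': the early-return double loop, ported as List.any
def coveredB (patterns : List String) (line : String) (i : Int) : Bool :=
  patterns.any (fun p =>
    (PySem.List.pyRange (max 0 (i - PySem.Str.len p + 1)) (i + 1) 1).any (fun s =>
      PySem.Str.slice line (some s) (some (s + PySem.Str.len p)) == p))


def count_runes_alt (runes : List String) (inscriptions : List String) : Int :=
  let patterns := runes.foldl (fun acc r => acc ++ [r, (PySem.Str.slice? r none none (-1)).getD ""]) []
  inscriptions.foldl (fun total line =>
    (PySem.List.pyRange 0 (PySem.Str.len line) 1).foldl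
      (fun total i => if coveredB patterns line i then total + 1 else total) total) 0

-- ===== PRECONDITION & SPEC =====
def Spec_count_runes (runes : List String) (inscriptions : List String) (out : Int) : Prop := out = count_runes_alt runes inscriptions
instance (runes : List String) (inscriptions : List String) (out : Int) : Decidable (Spec_count_runes runes inscriptions out) := by unfold Spec_count_runes; infer_instance

-- ===== CLAIM (what is proved, stated in full; the proofs are below) =====
def Claim_equal_count_runes : Prop := ∀ (runes : List String) (inscriptions : List String), Dom_count_runes runes inscriptions → Spec_count_runes runes inscriptions (count_runes runes inscriptions)

-- ===== LEMMAS AND PROOFS =====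

-- the covering predicate both programs count: position i lies inside some occurrence of some pattern
def covP (line : List Char) (pats : List (List Char)) (i : Nat) : Bool :=
  pats.any (fun p => (List.range (i + 1)).any (fun s =>
    decide (p <+: line.drop s) && decide (i < s + p.length)))

theorem covP_iff (line : List Char) (pats : List (List Char)) (i : Nat) :
    covP line pats i = true ↔ ∃ p ∈ pats, ∃ s ≤ i, p <+: line.drop s ∧ i < s + p.length := by
  simp [covP, List.any_eq_true, List.mem_range]

-- the patterns (each rune and its reverse), as char lists
def patsL (runes : List String) : List (List Char) :=
  runes.flatMap (fun r => [r.toList, r.toList.reverse])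

theorem exists_match_ge_iff (line pat : List Char) (k : Nat) :
    (∃ s : Nat, k ≤ s ∧ pat <+: line.drop s) ↔ pat <:+: line.drop k := by
  rw [← PySem.Chars.isIn_iff_infix, ← PySem.Chars.exists_prefix_drop_iff_isIn]
  constructor
  · rintro ⟨s, hks, hp⟩
    refine ⟨s - k, ?_⟩
    rw [List.drop_drop]
    rwa [show k + (s - k) = s by omega]
  · rintro ⟨j, hp⟩
    rw [List.drop_drop] at hp
    exact ⟨k + j, by omega, hp⟩

theorem findLoop_mem (line pat : List Char) (rlen : Nat) (hr : rlen = pat.length)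
    (start : Nat) (cov : PySem.Set Int) (i : Int) :
    i ∈ findLoop line pat rlen start cov ↔
      i ∈ cov ∨ ∃ s : Nat, start ≤ s ∧ pat <+: line.drop s ∧ (s : Int) ≤ i ∧ i < (s : Int) + rlen := by
  fun_induction findLoop line pat rlen start cov with
  | case1 start cov h =>
      constructor
      · exact Or.inl
      · rintro (hi | ⟨s, hss, hp, h1, h2⟩)
        · exact hi
        · exfalso
          by_cases hk : start ≤ line.length
          · exact (PySem.Chars.findFrom_natCast_eq_neg_one_iff line pat start hk).1 h
              ((exists_match_ge_iff line pat start).1 ⟨s, hss, hp⟩)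
          · have hnil : line.drop s = [] := List.drop_eq_nil_of_le (by omega)
            have hpe : pat = [] := List.prefix_nil.mp (hnil ▸ hp)
            have : rlen = 0 := by simp [hr, hpe]
            omega
  | case2 start cov h ih =>
      rw [ih]
      have hle := findFrom_start_le_length h
      obtain ⟨hge, hpre, hmin⟩ := PySem.Chars.findFrom_natCast_spec line pat start hle h
      set j := PySem.Chars.findFrom line pat (start : Int) none with hj
      have hj0 : 0 ≤ j := le_trans (by omega) hge
      have hjc : ((j.toNat : Nat) : Int) = j := Int.toNat_of_nonneg hj0
      rw [PySem.Set.mem_update]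
      constructor
      · rintro ((hc | hrange) | ⟨s, hss, hp, h1, h2⟩)
        · exact Or.inl hc
        · rw [PySem.List.mem_pyRange_one] at hrange
          exact Or.inr ⟨j.toNat, by omega, hpre, by omega, by omega⟩
        · exact Or.inr ⟨s, by omega, hp, h1, h2⟩
      · rintro (hc | ⟨s, hss, hp, h1, h2⟩)
        · exact Or.inl (Or.inl hc)
        · rcases lt_trichotomy s j.toNat with hlt | heq | hgt
          · exact absurd hp (hmin s hss hlt)
          · subst heq
            refine Or.inl (Or.inr ?_)
            rw [PySem.List.mem_pyRange_one]
            omega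
          · exact Or.inr ⟨s, by omega, hp, h1, h2⟩

theorem findLoop_nodup (line pat : List Char) (rlen : Nat) (start : Nat) (cov : PySem.Set Int)
    (h : cov.Nodup) : (findLoop line pat rlen start cov).Nodup := by
  fun_induction findLoop line pat rlen start cov with
  | case1 start cov h1 => exact h
  | case2 start cov h1 ih => exact ih (PySem.Set.nodup_update _ _ h)

theorem foldrunes_mem (line : List Char) (runes : List String) (cov0 : PySem.Set Int) (i : Int) :
    i ∈ runes.foldl (fun cov rune =>
          ([rune, (PySem.Str.slice? rune none none (-1)).getD ""]).foldl
            (fun cov pat => findLoop line pat.toList rune.toList.length 0 cov) cov) cov0 ↔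
      i ∈ cov0 ∨ ∃ p ∈ patsL runes, ∃ s : Nat, p <+: line.drop s ∧ (s : Int) ≤ i ∧ i < (s : Int) + p.length := by
  induction runes generalizing cov0 with
  | nil => simp [patsL]
  | cons r rs ih =>
      simp only [List.foldl_cons, List.foldl_nil, PySem.Str.slice?_none_none_neg_one,
        Option.getD_some, String.toList_ofList] at ih ⊢
      rw [ih, findLoop_mem line (r.toList.reverse) r.toList.length (by simp) 0 _ i,
        findLoop_mem line r.toList r.toList.length rfl 0 _ i]
      simp only [patsL, List.flatMap_cons, List.mem_append, List.mem_cons,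
        List.not_mem_nil, or_false, Nat.zero_le, true_and]
      constructor
      · rintro (((hc | ⟨s, hp, h1, h2⟩) | ⟨s, hp, h1, h2⟩) | ⟨p, hmem, s, hp, h1, h2⟩)
        · exact Or.inl hc
        · exact Or.inr ⟨r.toList, Or.inl (Or.inl rfl), s, hp, h1, h2⟩
        · exact Or.inr ⟨r.toList.reverse, Or.inl (Or.inr rfl), s, hp, h1, by simpa using h2⟩
        · exact Or.inr ⟨p, Or.inr hmem, s, hp, h1, h2⟩
      · rintro (hc | ⟨p, ((rfl | rfl) | hmem), s, hp, h1, h2⟩)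
        · exact Or.inl (Or.inl (Or.inl hc))
        · exact Or.inl (Or.inl (Or.inr ⟨s, hp, h1, h2⟩))
        · exact Or.inl (Or.inr ⟨s, hp, h1, by simpa using h2⟩)
        · exact Or.inr ⟨p, hmem, s, hp, h1, h2⟩

theorem covA_mem (line : List Char) (runes : List String) (i : Int) :
    i ∈ runes.foldl (fun cov rune =>
          ([rune, (PySem.Str.slice? rune none none (-1)).getD ""]).foldl
            (fun cov pat => findLoop line pat.toList rune.toList.length 0 cov) cov) PySem.Set.empty ↔
      ∃ k : Nat, i = (k : Int) ∧ k < line.length ∧ covP line (patsL runes) k = true := by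
  rw [foldrunes_mem]
  simp only [PySem.Set.empty, List.not_mem_nil, false_or]
  constructor
  · rintro ⟨p, hmem, s, hp, h1, h2⟩
    have hlen : p.length ≤ line.length - s := by simpa using hp.length_le
    have hs0 : s ≤ line.length := by
      by_contra hc
      have : line.drop s = [] := List.drop_eq_nil_of_le (by omega)
      have := List.prefix_nil.mp (this ▸ hp)
      simp [this] at h2; omega
    exact ⟨i.toNat, by omega, by omega,
      (covP_iff _ _ _).2 ⟨p, hmem, s, by omega, hp, by omega⟩⟩
  · rintro ⟨k, rfl, hk, hcov⟩
    obtain ⟨p, hmem, s, hsk, hp, h2⟩ := (covP_iff _ _ _).1 hcov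
    exact ⟨p, hmem, s, hp, by omega, by omega⟩

theorem foldrunes_nodup (line : List Char) (runes : List String) (cov0 : PySem.Set Int)
    (h : cov0.Nodup) :
    (runes.foldl (fun cov rune =>
        ([rune, (PySem.Str.slice? rune none none (-1)).getD ""]).foldl
          (fun cov pat => findLoop line pat.toList rune.toList.length 0 cov) cov) cov0).Nodup := by
  induction runes generalizing cov0 with
  | nil => simpa
  | cons r rs ih =>
      simp only [List.foldl_cons, List.foldl_nil]
      exact ih _ (findLoop_nodup _ _ _ _ _ (findLoop_nodup _ _ _ _ _ h))

theorem lineA (line : List Char) (runes : List String) :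
    PySem.Set.len
      (runes.foldl (fun cov rune =>
        ([rune, (PySem.Str.slice? rune none none (-1)).getD ""]).foldl
          (fun cov pat => findLoop line pat.toList rune.toList.length 0 cov) cov) PySem.Set.empty)
      = ((List.range line.length).countP (covP line (patsL runes)) : Int) := by
  have hnd2 : (List.map (fun k : Nat => (k : Int))
      ((List.range line.length).filter (covP line (patsL runes)))).Nodup :=
    ((List.nodup_range).filter _).map (fun a b h => by exact_mod_cast h)
  have hperm := (List.perm_ext_iff_of_nodup
      (foldrunes_nodup line runes PySem.Set.empty (by simp [PySem.Set.empty])) hnd2).2 ?_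
  · rw [PySem.Set.len, hperm.length_eq, List.length_map,
      ← List.countP_eq_length_filter]
  · intro a
    rw [covA_mem]
    simp only [List.mem_map, List.mem_filter, List.mem_range]
    constructor
    · rintro ⟨k, rfl, hk, hc⟩; exact ⟨k, ⟨hk, hc⟩, rfl⟩
    · rintro ⟨k, ⟨hk, hc⟩, rfl⟩; exact ⟨k, rfl, hk, hc⟩

theorem slice_eq_iff (line p : String) (s : Int) (hs : 0 ≤ s) :
    (PySem.Str.slice line (some s) (some (s + PySem.Str.len p)) == p) = true ↔
      p.toList <+: line.toList.drop s.toNat := by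
  have hp0 : (0 : Int) ≤ PySem.Str.len p := by simp [PySem.Str.len]
  rw [beq_iff_eq, ← String.toList_inj, PySem.Str.toList_slice, PySem.Chars.slice_eq_listSlice,
    PySem.List.slice_toNat line.toList (a := s) (b := s + PySem.Str.len p) hs (by omega)]
  have hL : (s + PySem.Str.len p).toNat - s.toNat = p.toList.length := by
    simp [PySem.Str.len]; omega
  rw [hL, List.prefix_iff_eq_take]
  exact eq_comm

theorem coveredB_eq (runes : List String) (line : String) (k : Nat) :
    coveredB (runes.foldl (fun acc r => acc ++ [r, (PySem.Str.slice? r none none (-1)).getD ""]) []) line (k : Int)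
      = covP line.toList (patsL runes) k := by
  rw [Bool.eq_iff_iff, covP_iff]
  unfold coveredB
  rw [PySem.List.foldl_append_eq_flatMap, List.nil_append]
  simp only [List.any_eq_true, List.mem_flatMap, List.mem_cons, List.not_mem_nil, or_false,
    PySem.Str.slice?_none_none_neg_one, Option.getD_some, PySem.List.mem_pyRange_one]
  unfold patsL
  simp only [List.mem_flatMap, List.mem_cons, List.not_mem_nil, or_false]
  constructor
  · rintro ⟨p, ⟨r, hr, hp⟩, sI, ⟨hlo, hhi⟩, hcond⟩
    have hs0 : 0 ≤ sI := le_trans (le_max_left _ _) hlo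
    have hpre := (slice_eq_iff line p sI hs0).1 hcond
    have hLlo : (↑k : Int) - PySem.Str.len p + 1 ≤ sI := le_trans (le_max_right _ _) hlo
    have hL : PySem.Str.len p = (p.toList.length : Int) := by simp [PySem.Str.len]
    rw [hL] at hLlo
    refine ⟨p.toList, ⟨r, hr, ?_⟩, sI.toNat, by omega, hpre, by omega⟩
    rcases hp with rfl | rfl
    · exact Or.inl rfl
    · exact Or.inr (by simp)
  · rintro ⟨pl, ⟨r, hr, hpl⟩, s, hsk, hpre, hcov⟩
    -- choose the String pattern whose toList is pl
    obtain ⟨p, hpmem, hplist⟩ : ∃ p : String, (p = r ∨ p = String.ofList r.toList.reverse) ∧ p.toList = pl := by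
      rcases hpl with rfl | rfl
      · exact ⟨r, Or.inl rfl, rfl⟩
      · exact ⟨String.ofList r.toList.reverse, Or.inr rfl, by simp⟩
    have hL : PySem.Str.len p = (pl.length : Int) := by simp [PySem.Str.len, hplist]
    refine ⟨p, ⟨r, hr, hpmem⟩, (s : Int), ⟨?_, by omega⟩, ?_⟩
    · rw [hL]; omega
    · rw [slice_eq_iff line p (s : Int) (by omega)]
      simpa [hplist] using hpre

theorem lineB (runes : List String) (line : String) (total : Int) :
    (PySem.List.pyRange 0 (PySem.Str.len line) 1).foldl
      (fun total i => if coveredB (runes.foldl (fun acc r => acc ++ [r, (PySem.Str.slice? r none none (-1)).getD ""]) []) line i then total + 1 else total) total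
      = total + ((List.range line.toList.length).countP (covP line.toList (patsL runes)) : Int) := by
  rw [PySem.List.foldl_count_if]
  congr 1
  rw [PySem.List.pyRange_one, List.countP_map]
  have hn : (PySem.Str.len line - 0).toNat = line.toList.length := by simp [PySem.Str.len]
  rw [hn]
  apply congrArg
  apply List.countP_congr
  intro k _
  simp only [Function.comp_apply, zero_add, coveredB_eq runes line k]

theorem count_runes_spec_aux (runes inscriptions : List String) :
    count_runes runes inscriptions = count_runes_alt runes inscriptions := by
  simp only [count_runes, count_runes_alt]
  trans (inscriptions.foldl (fun total line =>
    total + ((List.range line.toList.length).countP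
      (covP line.toList (patsL runes)) : Int)) 0)
  · exact PySem.List.foldl_congr_mem _ _ _ _ (fun total line _ => by rw [lineA])
  · exact (PySem.List.foldl_congr_mem _ _ _ _ (fun total line _ => lineB runes line total)).symm

-- ===== VERDICT (by name: the statement is the Claim_ definition above) =====
theorem count_runes_spec : Claim_equal_count_runes :=
  fun runes inscriptions _ => count_runes_spec_aux runes inscriptions
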